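-- pv_equiv track=rewrite | github.com/eiharun/CTFs | 0PracticeCTF_Writeups/Cryptopals/Set 1/Single_byte_XOR_cipher_decoder.py | ETAOIN
-- ===== SOURCE A (Python) =====
-- def ETAOIN(input_list):
--     '''function to score each brute force output for likelihood that it is readable using ETAOIN'''
--     strings ={}
--     points = {#SHRDLU
--         'E':12,
--         'T':11,
--         'A':10,
--         'O':9,
--         'I':8,
--         'N':7,
--         'S':6,
--         'H':5,
--         'R':4,
--         'D':3,
--         'L':2,
--         'U':1
--     }
--
--     for input in input_list:
--         strings[input] = 0
--
--         for x in points.items():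
--
--             if x[0] in input or x[0].lower() in input:
--                 strings[input] += x[1]
--
--     #del keys with value 0 to clean up output
--     for value in list(strings.items()):
--         if value[1] == 0:
--             del strings[value[0]]
--
--     #sort from highest to lowest score
--     strings = dict(reversed(sorted(strings.items(), key=lambda x:x[1])))#note: reseach lambda function
--
--     return strings
-- ===== SOURCE B (Python) =====
-- def ETAOIN(input_list):
--     points = {'E':12,'T':11,'A':10,'O':9,'I':8,'N':7,'S':6,'H':5,'R':4,'D':3,'L':2,'U':1}
--     strings = {}
--     for s in input_list:
--         strings[s] = sum(points.get(c, 0) for c in set(s.upper()))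
--     strings = {k: v for k, v in strings.items() if v != 0}
--     return dict(reversed(sorted(strings.items(), key=lambda x: x[1])))
-- ===== Notes on version B (the rewrite author's own statement) =====
-- stated objective: alternative
-- what changed: Each string is scored in one pass over its distinct uppercased characters looked up in the points table (and the zero-score drop becomes a dict comprehension), instead of A's 24 substring membership tests per string with in-place dict accumulation and a delete loop.
import Mathlib
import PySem

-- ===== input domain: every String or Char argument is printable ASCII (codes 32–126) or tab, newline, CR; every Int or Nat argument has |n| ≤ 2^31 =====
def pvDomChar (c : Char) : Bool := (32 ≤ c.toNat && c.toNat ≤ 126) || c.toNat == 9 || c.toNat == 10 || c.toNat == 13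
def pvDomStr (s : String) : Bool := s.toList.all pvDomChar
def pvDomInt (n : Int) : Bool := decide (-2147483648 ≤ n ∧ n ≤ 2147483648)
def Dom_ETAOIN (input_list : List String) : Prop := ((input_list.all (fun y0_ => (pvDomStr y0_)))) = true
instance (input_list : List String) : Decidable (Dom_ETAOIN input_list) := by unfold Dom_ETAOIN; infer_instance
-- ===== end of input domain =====

-- B scores each string in one pass over its distinct uppercased characters via the frequency
-- table (instead of A's 12 substring membership tests per string); return value proved equal.

-- ===== PORT A =====
def pointsA : PySem.Dict String Int :=
  PySem.Dict.mk [("E",12),("T",11),("A",10),("O",9),("I",8),("N",7),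
                 ("S",6),("H",5),("R",4),("D",3),("L",2),("U",1)]

def ETAOIN (input_list : List String) : List (String × Int) :=
  let points := pointsA
  let strings : PySem.Dict String Int :=
    input_list.foldl (fun strings input =>
      points.items.foldl (fun strings x =>
        if PySem.Str.isIn x.1 input || PySem.Str.isIn (PySem.Str.lower x.1) input then
          strings.insert input (strings.getD input 0 + x.2)
        else strings) (strings.insert input 0)) PySem.Dict.empty
  -- del keys with value 0
  let strings := strings.items.foldl (fun d value =>
      if value.2 == 0 then d.erase value.1 else d) strings
  -- sort from highest to lowest score
  (PySem.Dict.ofList ((PySem.List.sorted strings.items (fun x => x.2) false).reverse)).items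

-- ===== PORT B =====
def pointsB : PySem.Dict String Int :=
  PySem.Dict.mk [("E",12),("T",11),("A",10),("O",9),("I",8),("N",7),
                 ("S",6),("H",5),("R",4),("D",3),("L",2),("U",1)]

def scoreB (s : String) : Int :=
  ((PySem.Set.ofList (PySem.Str.upper s).toList).map
    (fun c => pointsB.getD (String.ofList [c]) 0)).sum

def ETAOIN_alt (input_list : List String) : List (String × Int) :=
  let strings : PySem.Dict String Int :=
    input_list.foldl (fun d s => d.insert s (scoreB s)) PySem.Dict.empty
  let strings2 : PySem.Dict String Int :=
    (strings.items.filter (fun p => !(p.2 == 0))).foldl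
      (fun d p => d.insert p.1 p.2) PySem.Dict.empty
  (PySem.Dict.ofList ((PySem.List.sorted strings2.items (fun x => x.2) false).reverse)).items

-- ===== PRECONDITION & SPEC =====
def Spec_ETAOIN (input_list : List String) (out : List (String × Int)) : Prop := out = ETAOIN_alt input_list
instance (input_list : List String) (out : List (String × Int)) : Decidable (Spec_ETAOIN input_list out) := by unfold Spec_ETAOIN; infer_instance

-- ===== CLAIM (what is proved, stated in full; the proofs are below) =====
def Claim_equal_ETAOIN : Prop := ∀ (input_list : List String), Dom_ETAOIN input_list → Spec_ETAOIN input_list (ETAOIN input_list)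

-- ===== LEMMAS AND PROOFS =====

theorem char_le_iff (a b : Char) : a ≤ b ↔ a.toNat ≤ b.toNat := by
  rw [Char.le_def, UInt32.le_iff_toNat_le]; rfl

theorem char_toNat_inj (c d : Char) (h : c.toNat = d.toNat) : c = d := by
  have := congrArg Char.ofNat h
  rwa [Char.ofNat_toNat, Char.ofNat_toNat] at this

theorem toNat_ofNat_letter (m : Nat) (h1 : 65 ≤ m) (h2 : m ≤ 122) : (Char.ofNat m).toNat = m := by
  rw [Char.toNat_ofNat, if_pos (Or.inl (by omega : m < 0xD800))]

theorem lowerChar_letter (L : Char) (hL1 : 65 ≤ L.toNat) (hL2 : L.toNat ≤ 90) :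
    (PySem.Chars.lowerChar L).toNat = L.toNat + 32 := by
  have hA : 'A' ≤ L := (char_le_iff _ _).mpr (by simpa using hL1)
  have hZ : L ≤ 'Z' := (char_le_iff _ _).mpr (by simpa using hL2)
  rw [PySem.Chars.lowerChar, if_pos (by simp [PySem.Chars.isupper, hA, hZ])]
  exact toNat_ofNat_letter _ (by omega) (by omega)

theorem upperChar_eq_iff (L : Char) (hL1 : 65 ≤ L.toNat) (hL2 : L.toNat ≤ 90) (c : Char) :
    (PySem.Chars.upperChar c = L ↔ c = L ∨ c = PySem.Chars.lowerChar L) := by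
  rw [PySem.Chars.upperChar]
  by_cases h : PySem.Chars.islower c = true
  · have hh : 'a' ≤ c ∧ c ≤ 'z' := by simpa [PySem.Chars.islower] using h
    have h97 : 97 ≤ c.toNat := by simpa using (char_le_iff _ _).mp hh.1
    have h122 : c.toNat ≤ 122 := by simpa using (char_le_iff _ _).mp hh.2
    rw [if_pos h]
    constructor
    · intro he
      right
      apply char_toNat_inj
      rw [lowerChar_letter L hL1 hL2, ← he, toNat_ofNat_letter _ (by omega) (by omega)]
      omega
    · rintro (rfl | rfl)
      · omega
      · apply char_toNat_inj
        rw [toNat_ofNat_letter _ (by omega) (by omega)]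
        rw [lowerChar_letter L hL1 hL2] at h97 h122 ⊢
        omega
  · rw [if_neg h]
    constructor
    · intro he; exact Or.inl he
    · rintro (rfl | rfl)
      · rfl
      · exfalso
        apply h
        have hl := lowerChar_letter L hL1 hL2
        have ha : 'a' ≤ PySem.Chars.lowerChar L := (char_le_iff _ _).mpr (by simp [hl]; omega)
        have hz : PySem.Chars.lowerChar L ≤ 'z' := (char_le_iff _ _).mpr (by simp [hl]; omega)
        simp [PySem.Chars.islower, ha, hz]

theorem mem_upper_iff (L : Char) (hL1 : 65 ≤ L.toNat) (hL2 : L.toNat ≤ 90) (l : List Char) :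
    L ∈ PySem.Chars.upper l ↔ L ∈ l ∨ PySem.Chars.lowerChar L ∈ l := by
  rw [PySem.Chars.upper, List.mem_map]
  constructor
  · rintro ⟨c, hc, he⟩
    rcases (upperChar_eq_iff L hL1 hL2 c).mp he with rfl | rfl
    · exact Or.inl hc
    · exact Or.inr hc
  · rintro (h | h)
    · exact ⟨L, h, (upperChar_eq_iff L hL1 hL2 L).mpr (Or.inl rfl)⟩
    · exact ⟨_, h, (upperChar_eq_iff L hL1 hL2 _).mpr (Or.inr rfl)⟩

-- A's per-letter ite term equals a membership test in B's set of uppercased characters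
theorem term_eq (s : String) (L : Char) (hL1 : 65 ≤ L.toNat) (hL2 : L.toNat ≤ 90) (w : Int)
    (str : String) (hstr : str = String.ofList [L]) :
    (if PySem.Str.isIn str s || PySem.Str.isIn (PySem.Str.lower str) s then w else 0)
      = (if L ∈ PySem.Set.ofList (PySem.Str.upper s).toList then w else 0) := by
  subst hstr
  have hlow : (PySem.Str.lower (String.ofList [L])).toList = [PySem.Chars.lowerChar L] := by
    simp [PySem.Str.lower, PySem.Chars.lower]
  have h : (PySem.Str.isIn (String.ofList [L]) s || PySem.Str.isIn (PySem.Str.lower (String.ofList [L])) s) = true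
      ↔ L ∈ PySem.Set.ofList (PySem.Str.upper s).toList := by
    rw [Bool.or_eq_true, PySem.Str.isIn_iff_infix, PySem.Str.isIn_iff_infix, hlow,
        String.toList_ofList, List.singleton_infix_iff, List.singleton_infix_iff,
        PySem.Set.mem_ofList]
    have : (PySem.Str.upper s).toList = PySem.Chars.upper s.toList := by
      simp [PySem.Str.upper]
    rw [this, mem_upper_iff L hL1 hL2]
  exact if_congr h rfl rfl

-- the init-to-0-then-accumulate inner loop of A is a single insert of the accumulated score
theorem innerA (ps : List (String × Int)) (cond : String × Int → Bool)
    (d : PySem.Dict String Int) (k : String) (v : Int) :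
    ps.foldl (fun d x => if cond x then d.insert k (d.getD k 0 + x.2) else d) (d.insert k v)
      = d.insert k (ps.foldl (fun a x => if cond x then a + x.2 else a) v) := by
  induction ps generalizing v with
  | nil => rfl
  | cons x ps ih =>
    simp only [List.foldl]
    by_cases h : cond x = true
    · rw [if_pos h, if_pos h, PySem.Dict.getD_insert_self, PySem.Dict.insert_insert_self, ih]
    · rw [if_neg h, if_neg h, ih]

-- first-match lookup in an association list of char points
def lookC : List (Char × Int) → Char → Int
  | [], _ => 0
  | p :: ps, c => if p.1 == c then p.2 else lookC ps c

theorem lookC_eq_zero (P : List (Char × Int)) (c : Char) (h : c ∉ P.map Prod.fst) : lookC P c = 0 := by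
  induction P with
  | nil => rfl
  | cons p P ih =>
    simp only [List.map, List.mem_cons, not_or] at h
    rw [lookC, if_neg (fun hb => h.1 (eq_of_beq hb).symm), ih h.2]

theorem sum_ite_head (U : List Char) (hU : U.Nodup) (L : Char) (w : Int) (g : Char → Int)
    (hg : g L = 0) :
    (U.map (fun c => if L == c then w else g c)).sum
      = (if L ∈ U then w else 0) + (U.map g).sum := by
  induction U with
  | nil => simp
  | cons a U ih =>
    have hU' := (List.nodup_cons.mp hU).2
    by_cases h : L = a
    · subst h
      have hnot : L ∉ U := (List.nodup_cons.mp hU).1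
      have hmap : U.map (fun c => if L == c then w else g c) = U.map g :=
        List.map_congr_left (fun c hc => by
          have : ¬ L = c := fun e => hnot (e ▸ hc)
          simp [this])
      rw [List.map_cons, List.sum_cons, hmap, List.map_cons, List.sum_cons, hg,
          if_pos (beq_self_eq_true L), if_pos List.mem_cons_self]
      ring
    · have hih := ih hU'
      rw [List.map_cons, List.sum_cons, List.map_cons, List.sum_cons, hih,
          if_neg (by simp [h] : ¬ ((L == a) = true))]
      have hmemc : (L ∈ a :: U) ↔ L ∈ U := by simp [List.mem_cons, h]
      by_cases hm : L ∈ U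
      · rw [if_pos (hmemc.mpr hm), if_pos hm]; ring
      · rw [if_neg (fun hh => hm (hmemc.mp hh)), if_neg hm]; ring

theorem sum_lookC (P : List (Char × Int)) (hP : (P.map Prod.fst).Nodup)
    (U : List Char) (hU : U.Nodup) :
    (U.map (lookC P)).sum = (P.map (fun p => if p.1 ∈ U then p.2 else 0)).sum := by
  induction P with
  | nil => simp [lookC]
  | cons p P ih =>
    have h1 : p.1 ∉ P.map Prod.fst := (List.nodup_cons.mp hP).1
    have h2 := (List.nodup_cons.mp hP).2
    have hrw : (U.map (lookC (p :: P))).sum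
        = (U.map (fun c => if p.1 == c then p.2 else lookC P c)).sum := rfl
    rw [hrw, sum_ite_head U hU p.1 p.2 (lookC P) (lookC_eq_zero P p.1 h1), ih h2,
        List.map_cons, List.sum_cons]

def P0 : List (Char × Int) :=
  [('E',12),('T',11),('A',10),('O',9),('I',8),('N',7),('S',6),('H',5),('R',4),('D',3),('L',2),('U',1)]

theorem beq_singleton (a c : Char) : (String.ofList [a] == String.ofList [c]) = (a == c) := by
  by_cases h : a = c
  · subst h; simp
  · have hne : ¬ String.ofList [a] = String.ofList [c] := by
      intro he
      apply h
      have := congrArg String.toList he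
      simpa using this
    rw [beq_eq_false_iff_ne.mpr hne, beq_eq_false_iff_ne.mpr h]

theorem getD_mk_chars (ps : List (Char × Int)) (c : Char) :
    (PySem.Dict.mk (ps.map (fun p => (String.ofList [p.1], p.2)))).getD (String.ofList [c]) 0
      = lookC ps c := by
  induction ps with
  | nil => rfl
  | cons p ps ih =>
    rw [List.map_cons, PySem.Dict.getD_eq_get?_getD, PySem.Dict.get?_mk_cons, beq_singleton p.1 c]
    by_cases h : (p.1 == c) = true
    · rw [lookC, if_pos h, if_pos h]; rfl
    · rw [lookC, if_neg h, if_neg h, ← PySem.Dict.getD_eq_get?_getD]; exact ih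

theorem getD_eq_lookC (c : Char) :
    pointsB.getD (String.ofList [c]) 0 = lookC P0 c := by
  have : pointsB = PySem.Dict.mk (P0.map (fun p => (String.ofList [p.1], p.2))) := rfl
  rw [this, getD_mk_chars]

-- the central score equality: A's 12 membership tests = B's pass over the distinct chars
theorem score_eq (s : String) :
    pointsA.items.foldl
        (fun a x => if PySem.Str.isIn x.1 s || PySem.Str.isIn (PySem.Str.lower x.1) s then a + x.2 else a) 0
      = scoreB s := by
  have hstep : (fun (a : Int) (x : String × Int) =>
      if PySem.Str.isIn x.1 s || PySem.Str.isIn (PySem.Str.lower x.1) s then a + x.2 else a)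
      = fun a x => a + (if PySem.Str.isIn x.1 s || PySem.Str.isIn (PySem.Str.lower x.1) s then x.2 else 0) := by
    funext a x; split_ifs <;> simp
  rw [hstep, PySem.List.foldl_add, zero_add, scoreB]
  have hmapB : (fun c => pointsB.getD (String.ofList [c]) 0) = lookC P0 := by
    funext c; exact getD_eq_lookC c
  rw [hmapB, sum_lookC P0 (by decide) _ (PySem.Set.nodup_ofList _)]
  show ((pointsA.items.map _).sum = _)
  simp only [pointsA, List.map_cons, List.map_nil, List.sum_cons, List.sum_nil, P0]
  rw [term_eq s 'E' (by decide) (by decide) 12 "E" rfl,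
      term_eq s 'T' (by decide) (by decide) 11 "T" rfl,
      term_eq s 'A' (by decide) (by decide) 10 "A" rfl,
      term_eq s 'O' (by decide) (by decide) 9 "O" rfl,
      term_eq s 'I' (by decide) (by decide) 8 "I" rfl,
      term_eq s 'N' (by decide) (by decide) 7 "N" rfl,
      term_eq s 'S' (by decide) (by decide) 6 "S" rfl,
      term_eq s 'H' (by decide) (by decide) 5 "H" rfl,
      term_eq s 'R' (by decide) (by decide) 4 "R" rfl,
      term_eq s 'D' (by decide) (by decide) 3 "D" rfl,
      term_eq s 'L' (by decide) (by decide) 2 "L" rfl,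
      term_eq s 'U' (by decide) (by decide) 1 "U" rfl]

-- zero-erasing loop of A, at the item-list level
theorem eraseLoop (l : List (String × Int)) (d : PySem.Dict String Int) :
    (l.foldl (fun d p => if p.2 == 0 then d.erase p.1 else d) d).items
      = d.items.filter (fun q => !(decide (q.1 ∈ (l.filter (fun p => p.2 == 0)).map Prod.fst))) := by
  induction l generalizing d with
  | nil => simp
  | cons p l ih =>
    simp only [List.foldl, List.filter_cons]
    by_cases h : (p.2 == 0) = true
    · rw [if_pos h, if_pos h, ih]
      simp only [PySem.Dict.erase, List.filter_filter, List.map_cons]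
      apply List.filter_congr
      intro q _
      by_cases hq : q.1 = p.1 <;>
        by_cases hm : q.1 ∈ List.map Prod.fst (List.filter (fun p => p.2 == 0) l) <;>
          simp [hq, hm, List.mem_cons]
    · rw [if_neg h, if_neg h, ih]

-- phase 1 of both programs builds the same dict
theorem phase1_eq (input_list : List String) :
    input_list.foldl (fun strings input =>
      pointsA.items.foldl (fun strings x =>
        if PySem.Str.isIn x.1 input || PySem.Str.isIn (PySem.Str.lower x.1) input then
          strings.insert input (strings.getD input 0 + x.2)
        else strings) (strings.insert input 0)) PySem.Dict.empty
    = input_list.foldl (fun d s => d.insert s (scoreB s)) PySem.Dict.empty := by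
  apply PySem.List.foldl_congr_mem
  intro d s _
  rw [innerA, score_eq]

-- the two zero-dropping phases produce the same item list
theorem phase2_eq (D : PySem.Dict String Int) (hnd : D.keys.Nodup) :
    (D.items.foldl (fun d value => if value.2 == 0 then d.erase value.1 else d) D).items
      = ((D.items.filter (fun p => !(p.2 == 0))).foldl
          (fun d p => d.insert p.1 p.2) PySem.Dict.empty).items := by
  have hnd' : (D.items.map Prod.fst).Nodup := hnd
  rw [eraseLoop,
      PySem.Dict.items_foldl_insert_fresh _ Prod.fst Prod.snd PySem.Dict.empty
        (fun a _ => PySem.Dict.contains_empty a.1)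
        (((List.filter_sublist).map Prod.fst).nodup hnd')]
  rw [show (PySem.Dict.empty : PySem.Dict String Int).items = [] from rfl, List.nil_append]
  have : (List.filter (fun p => !(p.2 == 0)) D.items).map (fun a => (a.1, a.2))
      = List.filter (fun p => !(p.2 == 0)) D.items := by
    rw [show (fun (a : String × Int) => (a.1, a.2)) = id from rfl, List.map_id]
  rw [this]
  apply List.filter_congr
  intro q hq
  congr 1
  by_cases hz : q.2 = 0
  · have : q.1 ∈ (D.items.filter (fun p => p.2 == 0)).map Prod.fst :=
      List.mem_map.mpr ⟨q, List.mem_filter.mpr ⟨hq, by simp [hz]⟩, rfl⟩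
    simp [this, hz]
  · have hnm : q.1 ∉ (D.items.filter (fun p => p.2 == 0)).map Prod.fst := by
      intro hmem
      rcases List.mem_map.mp hmem with ⟨p, hp, hp1⟩
      rcases List.mem_filter.mp hp with ⟨hpD, hp0⟩
      have : p = q := List.inj_on_of_nodup_map hnd' hpD hq hp1
      subst this
      exact hz (by simpa using hp0)
    simp [hnm, hz]

-- ===== VERDICT (by name: the statement is the Claim_ definition above) =====
theorem ETAOIN_spec : Claim_equal_ETAOIN := by
  intro input_list _
  show ETAOIN input_list = ETAOIN_alt input_list
  simp only [ETAOIN, ETAOIN_alt]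
  rw [phase1_eq,
      phase2_eq _ (PySem.Dict.nodup_keys_foldl_insert input_list (fun _ x => scoreB x) _
        PySem.Dict.nodup_keys_empty)]
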